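-- pv_equiv track=rewrite | github.com/thusmann5327/Unified_Theory_Physics | verification/engine_v2_remainder.py | nearest_fib_shell
-- ===== SOURCE A (Python) =====
-- FIBS = [1, 2, 3, 5, 8, 13, 21, 34, 55, 89, 144, 233]
--
-- def nearest_fib_shell(Z):
--     """Find the largest Fibonacci number <= Z (the shell Z lives in)."""
--     shell = 1
--     for f in FIBS:
--         if f <= Z:
--             shell = f
--         else:
--             break
--     return shell
-- ===== SOURCE B (Python) =====
-- FIBS = [1, 2, 3, 5, 8, 13, 21, 34, 55, 89, 144, 233]
--
-- def nearest_fib_shell(Z):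
--     """Find the largest Fibonacci number <= Z (the shell Z lives in)."""
--     # binary search for the insertion point of Z (bisect_right), then read off
--     lo, hi = 0, len(FIBS)
--     while lo < hi:
--         mid = (lo + hi) // 2
--         if Z < FIBS[mid]:
--             hi = mid
--         else:
--             lo = mid + 1
--     return FIBS[lo - 1] if lo > 0 else 1
-- ===== Notes on version B (the rewrite author's own statement) =====
-- stated objective: alternative
-- what changed: Replaces the linear scan-with-break over FIBS by a hand-written bisect_right binary search on the sorted constant list, reading off FIBS[idx-1] (or the default 1 when Z is below all entries).
import Mathlib
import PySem

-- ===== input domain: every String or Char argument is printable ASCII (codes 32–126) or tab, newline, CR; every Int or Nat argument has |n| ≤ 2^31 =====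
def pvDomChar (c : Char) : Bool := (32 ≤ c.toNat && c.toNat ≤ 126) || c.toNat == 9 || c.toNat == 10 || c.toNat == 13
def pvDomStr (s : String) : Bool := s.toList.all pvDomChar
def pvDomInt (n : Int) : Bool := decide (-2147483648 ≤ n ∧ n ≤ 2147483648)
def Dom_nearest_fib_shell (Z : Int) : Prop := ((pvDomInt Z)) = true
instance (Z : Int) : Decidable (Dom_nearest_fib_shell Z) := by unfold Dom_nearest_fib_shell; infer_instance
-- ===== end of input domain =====

-- B replaces A's linear scan-with-break over FIBS by a bisect_right binary search on the fixed sorted list (alternative decomposition, same result).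

-- ===== PORT A =====
def pvFIBS : List Int := [1, 2, 3, 5, 8, 13, 21, 34, 55, 89, 144, 233]

-- A's for-loop with break: recurse over the list, carrying `shell`; `break` = return `shell`
def pvLoopA (Z : Int) : List Int → Int → Int
  | [], shell => shell
  | f :: rest, shell => if f ≤ Z then pvLoopA Z rest f else shell

def nearest_fib_shell (Z : Int) : Int := pvLoopA Z pvFIBS 1

-- ===== PORT B =====
-- B's while-loop: fuel bounds the iterations (each step shrinks hi - lo, and
-- hi - lo ≤ pvFIBS.length initially, so fuel = pvFIBS.length suffices);
-- `mid = (lo + hi) // 2` is inlined (Nat division = Python // on non-negatives)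
def pvBisect (Z : Int) : Nat → Nat → Nat → Nat
  | 0, lo, _ => lo
  | fuel + 1, lo, hi =>
      if lo < hi then
        if Z < pvFIBS.getD ((lo + hi) / 2) 0 then pvBisect Z fuel lo ((lo + hi) / 2)
        else pvBisect Z fuel (((lo + hi) / 2) + 1) hi
      else lo

def nearest_fib_shell_alt (Z : Int) : Int :=
  let lo := pvBisect Z pvFIBS.length 0 pvFIBS.length
  if lo > 0 then pvFIBS.getD (lo - 1) 0 else 1

-- ===== PRECONDITION & SPEC =====
def Spec_nearest_fib_shell (Z : Int) (out : Int) : Prop := out = nearest_fib_shell_alt Z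
instance (Z : Int) (out : Int) : Decidable (Spec_nearest_fib_shell Z out) := by unfold Spec_nearest_fib_shell; infer_instance

-- ===== CLAIM (what is proved, stated in full; the proofs are below) =====
def Claim_equal_nearest_fib_shell : Prop := ∀ (Z : Int), Dom_nearest_fib_shell Z → Spec_nearest_fib_shell Z (nearest_fib_shell Z)

-- ===== LEMMAS AND PROOFS =====

-- A's loop depends on Z only through the comparisons f ≤ Z with list elements
lemma loop_congr (Z W : Int) (L : List Int) (s : Int)
    (H : ∀ f ∈ L, (f ≤ Z ↔ f ≤ W)) : pvLoopA Z L s = pvLoopA W L s := by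
  induction L generalizing s with
  | nil => rfl
  | cons f rest ih =>
      have hf := H f (List.mem_cons_self ..)
      have hr : ∀ g ∈ rest, (g ≤ Z ↔ g ≤ W) := fun g hg => H g (List.mem_cons_of_mem _ hg)
      by_cases h : f ≤ Z
      · rw [pvLoopA, pvLoopA, if_pos h, if_pos (hf.mp h), ih _ hr]
      · rw [pvLoopA, pvLoopA, if_neg h, if_neg (fun hw => h (hf.mpr hw))]

-- B's binary search depends on Z only through the comparisons Z < f with list elements
-- (the probed index (lo+hi)/2 stays below hi ≤ pvFIBS.length, so getD's default is never read)
lemma bisect_congr (Z W : Int) (H : ∀ f ∈ pvFIBS, (Z < f ↔ W < f)) :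
    ∀ (fuel lo hi : Nat), hi ≤ pvFIBS.length → pvBisect Z fuel lo hi = pvBisect W fuel lo hi := by
  intro fuel
  induction fuel with
  | zero => intro lo hi _; rfl
  | succ n ih =>
      intro lo hi hhi
      rw [pvBisect, pvBisect]
      by_cases hlh : lo < hi
      · rw [if_pos hlh, if_pos hlh]
        have hmid : (lo + hi) / 2 < pvFIBS.length := lt_of_lt_of_le (by omega) hhi
        have hmem : pvFIBS.getD ((lo + hi) / 2) 0 ∈ pvFIBS := by
          rw [List.getD_eq_getElem _ _ hmid]; exact List.getElem_mem hmid
        have hc := H _ hmem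
        by_cases hz : Z < pvFIBS.getD ((lo + hi) / 2) 0
        · rw [if_pos hz, if_pos (hc.mp hz), ih _ _ (le_of_lt hmid)]
        · rw [if_neg hz, if_neg (fun hw => hz (hc.mpr hw)), ih _ _ hhi]
      · rw [if_neg hlh, if_neg hlh]

lemma fibs_bounds : ∀ f ∈ pvFIBS, (1:Int) ≤ f ∧ f ≤ 233 := by decide

-- both ports agree on every representative 0 ≤ Z ≤ 233, checked exhaustively
set_option maxRecDepth 100000 in
lemma small_eq : ∀ n : Fin 234, nearest_fib_shell (n : Int) = nearest_fib_shell_alt (n : Int) := by decide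

-- ===== VERDICT (by name: the statement is the Claim_ definition above) =====
theorem nearest_fib_shell_spec : Claim_equal_nearest_fib_shell := by
  intro Z _
  unfold Spec_nearest_fib_shell
  -- clamp Z into [0, 233]: every comparison either port makes is unchanged
  set W : Int := max 0 (min Z 233) with hW
  have hcmp : ∀ f ∈ pvFIBS, ((f ≤ Z ↔ f ≤ W) ∧ (Z < f ↔ W < f)) := by
    intro f hf
    have := fibs_bounds f hf
    constructor <;> constructor <;> intro <;> omega
  have hA : nearest_fib_shell Z = nearest_fib_shell W := by
    unfold nearest_fib_shell
    exact loop_congr Z W pvFIBS 1 (fun f hf => (hcmp f hf).1)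
  have hB : nearest_fib_shell_alt Z = nearest_fib_shell_alt W := by
    unfold nearest_fib_shell_alt
    rw [bisect_congr Z W (fun f hf => (hcmp f hf).2) _ _ _ le_rfl]
  obtain ⟨n, hn⟩ : ∃ n : Fin 234, W = (n : Int) :=
    ⟨⟨W.toNat, by omega⟩, by simp; omega⟩
  rw [hA, hB, hn, small_eq n]
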